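-- pv_equiv track=rewrite | github.com/kudosscience/cognitive-ability-benchmark | benchmark/utils/generator.py | _simulate_habit_path
-- ===== SOURCE A (Python) =====
-- ALPHABET = tuple("ABCDEFGHIJKLMNOPQRSTUVWXYZ")
--
-- ALPHABET_SIZE = len(ALPHABET)
--
-- DEFAULT_FORWARD_DELTA = 1
--
-- def _letter_at(index: int) -> str:
--     return ALPHABET[index % ALPHABET_SIZE]
--
-- def _simulate_habit_path(
--     start_index: int,
--     steps: int,
--     override_letters: set[str],
--     override_delta: int,
-- ) -> list[str]:
--     current_index = start_index
--     visited_letters = [_letter_at(current_index)]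
--
--     for _ in range(steps):
--         current_letter = _letter_at(current_index)
--         delta = override_delta if current_letter in override_letters else DEFAULT_FORWARD_DELTA
--         current_index = (current_index + delta) % ALPHABET_SIZE
--         visited_letters.append(_letter_at(current_index))
--
--     return visited_letters
-- ===== SOURCE B (Python) =====
-- ALPHABET = tuple("ABCDEFGHIJKLMNOPQRSTUVWXYZ")
--
-- ALPHABET_SIZE = len(ALPHABET)
--
-- DEFAULT_FORWARD_DELTA = 1
--
--
-- def _simulate_habit_path(
--     start_index: int,
--     steps: int,
--     override_letters: set[str],
--     override_delta: int,
-- ) -> list[str]: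
--     # Precompute the transition table once: nexts[i] is the index reached
--     # from position i, so the walk loop is a branch-free table lookup.
--     nexts = [
--         (i + (override_delta if ALPHABET[i] in override_letters else DEFAULT_FORWARD_DELTA))
--         % ALPHABET_SIZE
--         for i in range(ALPHABET_SIZE)
--     ]
--     idx = start_index % ALPHABET_SIZE
--     visited = [ALPHABET[idx]]
--     for _ in range(steps):
--         idx = nexts[idx]
--         visited.append(ALPHABET[idx])
--     return visited
-- ===== Notes on version B (the rewrite author's own statement) =====
-- stated objective: alternative
-- what changed: B precomputes a 26-entry transition table over alphabet positions once, so the walk loop is a branch-free table lookup instead of re-deciding membership and re-doing modular arithmetic every step.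
import Mathlib
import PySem

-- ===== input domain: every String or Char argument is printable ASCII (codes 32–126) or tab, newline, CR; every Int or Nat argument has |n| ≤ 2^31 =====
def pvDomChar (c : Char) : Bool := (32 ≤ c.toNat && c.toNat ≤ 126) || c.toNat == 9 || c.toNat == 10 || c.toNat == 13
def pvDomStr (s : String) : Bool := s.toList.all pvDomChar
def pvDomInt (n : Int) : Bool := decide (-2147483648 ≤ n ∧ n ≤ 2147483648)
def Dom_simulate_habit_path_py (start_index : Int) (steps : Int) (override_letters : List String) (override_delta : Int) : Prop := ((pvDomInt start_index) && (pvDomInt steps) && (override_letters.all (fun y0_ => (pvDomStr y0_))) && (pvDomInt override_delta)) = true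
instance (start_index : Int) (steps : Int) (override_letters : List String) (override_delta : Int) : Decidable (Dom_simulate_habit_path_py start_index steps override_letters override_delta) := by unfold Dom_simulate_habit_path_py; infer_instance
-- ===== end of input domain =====

-- B precomputes the 26-entry transition table once so the walk loop is a branch-free lookup; A re-tests membership each step.

def pvAlphabet : List String :=
  ["A","B","C","D","E","F","G","H","I","J","K","L","M",
   "N","O","P","Q","R","S","T","U","V","W","X","Y","Z"]

-- ===== PORT A =====
-- _letter_at(index) = ALPHABET[index % ALPHABET_SIZE]; index % 26 is always in [0,26), so getD never uses its default
def pvLetterAt (index : Int) : String :=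
  pvAlphabet.getD (PySem.Int.mod index 26).toNat ""

-- the for-loop of A: one step = membership test, add delta, mod, append
def pvALoop (ov : List String) (od : Int) : Nat → Int → List String → List String
  | 0, _, acc => acc
  | n + 1, idx, acc =>
    let L := pvLetterAt idx
    let d : Int := if L ∈ ov then od else 1
    let idx' := PySem.Int.mod (idx + d) 26
    pvALoop ov od n idx' (acc ++ [pvLetterAt idx'])

def simulate_habit_path_py (start_index : Int) (steps : Int) (override_letters : List String) (override_delta : Int) : List String :=
  pvALoop override_letters override_delta steps.toNat start_index [pvLetterAt start_index]

-- ===== PORT B =====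
-- transition table: nexts[i] = (i + delta_i) % 26, built once over range(26)
def pvNexts (ov : List String) (od : Int) : List Int :=
  (List.range 26).map (fun (i : Nat) =>
    PySem.Int.mod ((i : Int) + (if pvAlphabet.getD i "" ∈ ov then od else 1)) 26)

-- the walk loop of B: branch-free table lookup
def pvBLoop (t : List Int) : Nat → Int → List String → List String
  | 0, _, acc => acc
  | n + 1, idx, acc =>
    let idx' := t.getD idx.toNat 0
    pvBLoop t n idx' (acc ++ [pvAlphabet.getD idx'.toNat ""])

def simulate_habit_path_py_alt (start_index : Int) (steps : Int) (override_letters : List String) (override_delta : Int) : List String :=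
  let idx := PySem.Int.mod start_index 26
  pvBLoop (pvNexts override_letters override_delta) steps.toNat idx [pvAlphabet.getD idx.toNat ""]

-- ===== PRECONDITION & SPEC =====
def Spec_simulate_habit_path_py (start_index : Int) (steps : Int) (override_letters : List String) (override_delta : Int) (out : List String) : Prop := out = simulate_habit_path_py_alt start_index steps override_letters override_delta
instance (start_index : Int) (steps : Int) (override_letters : List String) (override_delta : Int) (out : List String) : Decidable (Spec_simulate_habit_path_py start_index steps override_letters override_delta out) := by unfold Spec_simulate_habit_path_py; infer_instance

-- ===== CLAIM (what is proved, stated in full; the proofs are below) =====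
def Claim_equal_simulate_habit_path_py : Prop := ∀ (start_index : Int) (steps : Int) (override_letters : List String) (override_delta : Int), Dom_simulate_habit_path_py start_index steps override_letters override_delta → Spec_simulate_habit_path_py start_index steps override_letters override_delta (simulate_habit_path_py start_index steps override_letters override_delta)

-- ===== LEMMAS AND PROOFS =====

lemma pvNexts_getD (ov : List String) (od : Int) (m : Nat) (hm : m < 26) :
    (pvNexts ov od).getD m 0 =
      PySem.Int.mod ((m : Int) + (if pvAlphabet.getD m "" ∈ ov then od else 1)) 26 := by
  simp [pvNexts, List.getD_eq_getElem?_getD, hm]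

lemma pvMod_bounds (a : Int) : 0 ≤ PySem.Int.mod a 26 ∧ PySem.Int.mod a 26 < 26 :=
  ⟨PySem.Int.mod_nonneg a (by norm_num), PySem.Int.mod_lt a (by norm_num)⟩

lemma pvMod_add (a d : Int) :
    PySem.Int.mod (PySem.Int.mod a 26 + d) 26 = PySem.Int.mod (a + d) 26 := by
  simp only [PySem.Int.mod_eq_emod_of_pos (by norm_num : (0:Int) < 26)]
  omega

lemma pvMod_mod (a : Int) :
    PySem.Int.mod (PySem.Int.mod a 26) 26 = PySem.Int.mod a 26 := by
  simp only [PySem.Int.mod_eq_emod_of_pos (by norm_num : (0:Int) < 26)]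
  omega

lemma pvLetterAt_of_mod (a : Int) : pvLetterAt (PySem.Int.mod a 26) = pvLetterAt a := by
  unfold pvLetterAt
  rw [pvMod_mod]

lemma pvLoop_eq (ov : List String) (od : Int) :
    ∀ (n : Nat) (idx : Int) (acc : List String),
      pvALoop ov od n idx acc = pvBLoop (pvNexts ov od) n (PySem.Int.mod idx 26) acc := by
  intro n
  induction n with
  | zero => intro idx acc; rfl
  | succ n ih =>
    intro idx acc
    have hb := pvMod_bounds idx
    have hm : (PySem.Int.mod idx 26).toNat < 26 := by omega
    have hcast : ((PySem.Int.mod idx 26).toNat : Int) = PySem.Int.mod idx 26 := by omega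
    have hL : pvAlphabet.getD (PySem.Int.mod idx 26).toNat "" = pvLetterAt idx := rfl
    have hstep :
        (pvNexts ov od).getD (PySem.Int.mod idx 26).toNat 0 =
          PySem.Int.mod (idx + (if pvLetterAt idx ∈ ov then od else 1)) 26 := by
      rw [pvNexts_getD ov od _ hm, hL, hcast, pvMod_add]
    set d : Int := if pvLetterAt idx ∈ ov then od else 1 with hd
    show pvALoop ov od n (PySem.Int.mod (idx + d) 26)
          (acc ++ [pvLetterAt (PySem.Int.mod (idx + d) 26)]) = _
    rw [ih, pvLetterAt_of_mod]
    simp only [pvBLoop, hstep]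
    rw [pvMod_mod]
    rfl

-- ===== VERDICT (by name: the statement is the Claim_ definition above) =====
theorem simulate_habit_path_py_spec : Claim_equal_simulate_habit_path_py := by
  intro s steps ov od _
  unfold Spec_simulate_habit_path_py simulate_habit_path_py simulate_habit_path_py_alt
  rw [pvLoop_eq]
  rfl
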